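-- pv_equiv track=rewrite | github.com/vincentzlt/textprep | decomp.py | recursive_decomp_
-- ===== SOURCE A (Python) =====
-- def recursive_decomp_(decomp, decomp_dict):
--     ret_str = ''
--     for d in decomp:
--         if d == decomp_dict.get(d, d):
--             ret_str += d
--         else:
--             ret_str += recursive_decomp_(decomp_dict[d], decomp_dict)
--     return ret_str
-- ===== SOURCE B (Python) =====
-- def recursive_decomp_(decomp, decomp_dict):
--     # Bottom-up fixpoint: compute the full expansion of every decomposable key
--     # once, then expand the input with a single join.
--     body = {k: v for k, v in decomp_dict.items() if len(k) == 1 and k != v}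
--     exp = {k: k for k in body}
--     for _ in range(len(body)):
--         exp = {k: ''.join(exp.get(c, c) for c in v) for k, v in body.items()}
--     return ''.join(exp.get(c, c) for c in decomp)
-- ===== Notes on version B (the rewrite author's own statement) =====
-- stated objective: alternative
-- what changed: A re-expands every character by fresh unbounded recursion on each occurrence; B builds the full expansion of every decomposable key once, by iterating a bottom-up fixpoint table len(body) times, and then expands the input with a single join (no recursion).
import Mathlib
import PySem

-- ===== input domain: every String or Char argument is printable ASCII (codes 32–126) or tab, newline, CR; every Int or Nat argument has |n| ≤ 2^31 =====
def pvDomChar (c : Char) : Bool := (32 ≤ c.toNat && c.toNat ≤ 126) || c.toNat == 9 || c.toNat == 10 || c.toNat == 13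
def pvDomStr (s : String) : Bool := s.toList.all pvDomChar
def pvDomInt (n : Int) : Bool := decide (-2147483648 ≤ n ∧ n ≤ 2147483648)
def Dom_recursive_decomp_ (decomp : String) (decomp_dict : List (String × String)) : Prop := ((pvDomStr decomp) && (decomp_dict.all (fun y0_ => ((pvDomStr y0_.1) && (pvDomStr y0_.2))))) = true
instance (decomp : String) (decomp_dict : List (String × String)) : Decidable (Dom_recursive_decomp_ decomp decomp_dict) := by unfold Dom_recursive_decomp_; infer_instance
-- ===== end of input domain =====

-- B replaces A's per-character recursive re-expansion with a bottom-up fixpoint table holding the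
-- full expansion of every decomposable key, computed once, followed by a single join (objective: alternative).

-- ===== PORT A =====
-- A's unbounded recursion is ported with a fuel counter (decomp_dict.length + 1); under
-- Pre_recursive_decomp_ (no decomposition cycle reachable from decomp) the recursion depth never
-- exceeds the number of decomposable keys plus one, so the fuel is never exhausted there.
def pvExpandA (dd : PySem.Dict String String) : Nat → List Char → List Char
  | 0, _ => []
  | fuel+1, s =>
    s.foldl (fun acc d =>
      match PySem.Dict.get? dd d.toString with
      | none => acc ++ [d]                          -- decomp_dict.get(d, d) == d  (absent key)
      | some b =>
        if b = d.toString then acc ++ [d]           -- decomp_dict.get(d, d) == d  (identity entry)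
        else acc ++ pvExpandA dd fuel b.toList) []  -- ret_str += recursive_decomp_(decomp_dict[d], …)

def recursive_decomp_ (decomp : String) (decomp_dict : List (String × String)) : String :=
  String.ofList (pvExpandA (PySem.Dict.ofList decomp_dict) (decomp_dict.length + 1) decomp.toList)

-- ===== PORT B =====
def recursive_decomp__alt (decomp : String) (decomp_dict : List (String × String)) : String :=
  let dd := PySem.Dict.ofList decomp_dict
  -- body = {k: v for k, v in decomp_dict.items() if len(k) == 1 and k != v}
  let body : List (String × String) :=
    dd.items.filter (fun kv => PySem.Str.len kv.1 == 1 && kv.1 != kv.2)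
  -- exp = {k: k for k in body}
  let exp0 : PySem.Dict String String := PySem.Dict.ofList (body.map (fun kv => (kv.1, kv.1)))
  -- for _ in range(len(body)): exp = {k: ''.join(exp.get(c, c) for c in v) for k, v in body.items()}
  let expN := (List.range body.length).foldl
    (fun e _ => PySem.Dict.ofList (body.map (fun kv =>
      (kv.1, PySem.Str.join "" (kv.2.toList.map (fun c => PySem.Dict.getD e c.toString c.toString)))))) exp0
  -- return ''.join(exp.get(c, c) for c in decomp)
  PySem.Str.join "" (decomp.toList.map (fun c => PySem.Dict.getD expN c.toString c.toString))

-- ===== PRECONDITION & SPEC =====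
-- helpers for Pre_: the decomposable entries of the dict, and the one-step expansion of a character
def pvBody (decomp_dict : List (String × String)) : List (String × String) :=
  (PySem.Dict.ofList decomp_dict).items.filter (fun kv => PySem.Str.len kv.1 == 1 && kv.1 != kv.2)

def pvBodyOf (decomp_dict : List (String × String)) (c : Char) : Option (List Char) :=
  match PySem.Dict.get? (PySem.Dict.ofList decomp_dict) c.toString with
  | none => none
  | some b => if b = c.toString then none else some b.toList

-- pvSafe n = the decomposable characters whose decomposition DAG has height ≤ n
-- (iterated elimination of keys all of whose expansion characters are already resolved)
def pvSafeStep (decomp_dict : List (String × String)) (S : List Char) : List Char :=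
  (pvBody decomp_dict).filterMap (fun kv =>
    if kv.2.toList.all (fun e => decide (pvBodyOf decomp_dict e = none) || S.contains e)
    then kv.1.toList.head? else none)

def pvSafe (decomp_dict : List (String × String)) : Nat → List Char
  | 0 => []
  | n+1 => pvSafeStep decomp_dict (pvSafe decomp_dict n)

-- Pre_ excludes exactly the inputs whose expansion from decomp reaches a decomposition cycle:
-- there Python A recurses forever (RecursionError) and returns nothing.
def Pre_recursive_decomp_ (decomp : String) (decomp_dict : List (String × String)) : Prop :=
  decomp.toList.all (fun c => decide (pvBodyOf decomp_dict c = none)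
    || (pvSafe decomp_dict (pvBody decomp_dict).length).contains c) = true
instance (decomp : String) (decomp_dict : List (String × String)) : Decidable (Pre_recursive_decomp_ decomp decomp_dict) := by unfold Pre_recursive_decomp_; infer_instance

def pvWitness_recursive_decomp_ : String × (List (String × String)) :=
  ("cab", [("a", "bb"), ("b", "cd")])

def Spec_recursive_decomp_ (decomp : String) (decomp_dict : List (String × String)) (out : String) : Prop := out = recursive_decomp__alt decomp decomp_dict
instance (decomp : String) (decomp_dict : List (String × String)) (out : String) : Decidable (Spec_recursive_decomp_ decomp decomp_dict out) := by unfold Spec_recursive_decomp_; infer_instance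

-- ===== CLAIM (what is proved, stated in full; the proofs are below) =====
def Claim_equal_recursive_decomp_ : Prop := ∀ (decomp : String) (decomp_dict : List (String × String)), Dom_recursive_decomp_ decomp decomp_dict → Pre_recursive_decomp_ decomp decomp_dict → Spec_recursive_decomp_ decomp decomp_dict (recursive_decomp_ decomp decomp_dict)

-- ===== LEMMAS AND PROOFS =====

-- the ideal expansion, iterated j times; both ports compute it and the proofs meet here
def pvF (decomp_dict : List (String × String)) : Nat → Char → List Char
  | 0, c => [c]
  | j+1, c =>
    match pvBodyOf decomp_dict c with
    | none => [c]
    | some b => b.flatMap (pvF decomp_dict j)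

-- A's per-character action at a given fuel
def pvCharA (decomp_dict : List (String × String)) (fuel : Nat) (c : Char) : List Char :=
  match PySem.Dict.get? (PySem.Dict.ofList decomp_dict) c.toString with
  | none => [c]
  | some b =>
    if b = c.toString then [c]
    else pvExpandA (PySem.Dict.ofList decomp_dict) fuel b.toList

-- B's iterated expansion table
def pvIter (decomp_dict : List (String × String)) : Nat → PySem.Dict String String
  | 0 => PySem.Dict.ofList ((pvBody decomp_dict).map (fun kv => (kv.1, kv.1)))
  | j+1 => PySem.Dict.ofList ((pvBody decomp_dict).map (fun kv =>
      (kv.1, PySem.Str.join "" (kv.2.toList.map (fun c =>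
        PySem.Dict.getD (pvIter decomp_dict j) c.toString c.toString)))))

theorem pvF_nonkey (dd : List (String × String)) (c : Char) (h : pvBodyOf dd c = none) :
    ∀ j, pvF dd j c = [c] := by
  intro j; cases j <;> simp [pvF, h]

theorem pvToStringOfList {s : String} {c : Char} (h : s.toList = [c]) : s = c.toString := by
  apply String.toList_inj.mp; rw [h]; simp [Char.toString]

theorem pvOfList_items {L : List (String × String)} (h : (L.map Prod.fst).Nodup) :
    (PySem.Dict.ofList L).items = L := by
  have := PySem.Dict.items_foldl_insert_fresh L Prod.fst Prod.snd PySem.Dict.empty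
    (by intro a _; simp [PySem.Dict.contains_empty]) h
  simpa [PySem.Dict.ofList] using this

theorem pvBody_keys_nodup (dd : List (String × String)) :
    ((pvBody dd).map Prod.fst).Nodup := by
  have h1 : (PySem.Dict.ofList dd).keys.Nodup := PySem.Dict.nodup_keys_ofList dd
  have h2 : List.Sublist ((pvBody dd).map Prod.fst) ((PySem.Dict.ofList dd).items.map Prod.fst) :=
    List.Sublist.map _ List.filter_sublist
  have h3 : (PySem.Dict.ofList dd).items.map Prod.fst = (PySem.Dict.ofList dd).keys := rfl
  exact (h3 ▸ h2).nodup h1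

theorem pvBody_mem_get? (dd : List (String × String)) {kv : String × String}
    (h : kv ∈ pvBody dd) :
    (PySem.Dict.ofList dd).get? kv.1 = some kv.2 ∧ kv.1 ≠ kv.2 ∧ ∃ c, kv.1.toList = [c] := by
  have hmem : kv ∈ (PySem.Dict.ofList dd).items := List.mem_of_mem_filter h
  have hp := List.of_mem_filter h
  simp only [Bool.and_eq_true, beq_iff_eq, bne_iff_ne] at hp
  refine ⟨PySem.Dict.get?_of_mem_items _ (by exact (Prod.mk.eta ▸ hmem)) (PySem.Dict.nodup_keys_ofList dd), hp.2, ?_⟩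
  have hl : kv.1.toList.length = 1 := by
    have := PySem.Str.len_eq kv.1
    have h1 := hp.1
    rw [this] at h1
    exact_mod_cast h1
  rcases List.length_eq_one_iff.mp hl with ⟨c, hc⟩
  exact ⟨c, hc⟩

theorem pvBodyOf_of_mem (dd : List (String × String)) {kv : String × String} {c : Char}
    (h : kv ∈ pvBody dd) (hc : kv.1.toList = [c]) :
    pvBodyOf dd c = some kv.2.toList := by
  obtain ⟨hg, hne, -⟩ := pvBody_mem_get? dd h
  have hk : kv.1 = c.toString := pvToStringOfList hc
  rw [pvBodyOf, ← hk, hg]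
  simp only []
  rw [if_neg (fun e => hne e.symm)]

theorem pvBodyOf_some_mem (dd : List (String × String)) {c : Char} {b : List Char}
    (h : pvBodyOf dd c = some b) :
    ∃ kv ∈ pvBody dd, kv.1.toList = [c] ∧ kv.2.toList = b := by
  rw [pvBodyOf] at h
  cases hg : PySem.Dict.get? (PySem.Dict.ofList dd) c.toString with
  | none => rw [hg] at h; exact absurd h (by simp)
  | some v =>
    rw [hg] at h
    dsimp only at h
    by_cases hv : v = c.toString
    · rw [if_pos hv] at h; exact absurd h (by simp)
    · rw [if_neg hv] at h
      refine ⟨(c.toString, v), ?_, by simp [Char.toString], by simpa using h⟩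
      apply List.mem_filter.mpr
      refine ⟨PySem.Dict.mem_items_of_get?_eq_some _ hg, ?_⟩
      simp only [Bool.and_eq_true, beq_iff_eq, bne_iff_ne]
      constructor
      · rw [PySem.Str.len_eq]; simp [Char.toString]
      · exact fun e => hv e.symm

theorem pvExpandA_flat (dd : List (String × String)) (fuel : Nat) (s : List Char) :
    pvExpandA (PySem.Dict.ofList dd) (fuel + 1) s = s.flatMap (pvCharA dd fuel) := by
  show s.foldl _ [] = _
  have h : ∀ (acc : List Char) (d : Char),
      (fun (acc : List Char) (d : Char) =>
        match PySem.Dict.get? (PySem.Dict.ofList dd) d.toString with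
        | none => acc ++ [d]
        | some b =>
          if b = d.toString then acc ++ [d]
          else acc ++ pvExpandA (PySem.Dict.ofList dd) fuel b.toList) acc d
      = acc ++ pvCharA dd fuel d := by
    intro acc d
    simp only [pvCharA]
    cases PySem.Dict.get? (PySem.Dict.ofList dd) d.toString with
    | none => rfl
    | some b => simp only []; split_ifs <;> rfl
  calc s.foldl _ [] = s.foldl (fun acc d => acc ++ pvCharA dd fuel d) [] := by
        rw [funext fun acc => funext fun d => h acc d]
    _ = _ := by rw [PySem.List.foldl_append_eq_flatMap]; simp

theorem pvCharA_nonkey (dd : List (String × String)) (fuel : Nat) (c : Char)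
    (h : pvBodyOf dd c = none) : pvCharA dd fuel c = [c] := by
  rw [pvCharA]
  rw [pvBodyOf] at h
  cases hg : PySem.Dict.get? (PySem.Dict.ofList dd) c.toString with
  | none => rfl
  | some b =>
    rw [hg] at h; dsimp only at h
    by_cases hb : b = c.toString
    · simp [hb]
    · rw [if_neg hb] at h; exact absurd h (by simp)

theorem pvSafeStep_elim (dd : List (String × String)) {S : List Char} {c : Char}
    (h : c ∈ pvSafeStep dd S) :
    ∃ b, pvBodyOf dd c = some b ∧ ∀ e ∈ b, pvBodyOf dd e = none ∨ e ∈ S := by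
  rw [pvSafeStep, List.mem_filterMap] at h
  obtain ⟨kv, hkv, hif⟩ := h
  by_cases hcond : kv.2.toList.all (fun e => decide (pvBodyOf dd e = none) || S.contains e)
  · rw [if_pos hcond] at hif
    obtain ⟨-, -, c', hc'⟩ := pvBody_mem_get? dd hkv
    have hc : kv.1.toList = [c] := by
      rw [hc'] at hif ⊢
      simp at hif
      rw [hif]
    refine ⟨kv.2.toList, pvBodyOf_of_mem dd hkv hc, ?_⟩
    intro e he
    have := List.all_eq_true.mp hcond e he
    simpa using this
  · rw [if_neg hcond] at hif; exact absurd hif (by simp)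

-- main A-side lemma: a character settled at level i is expanded to pvF i by A, for any fuel ≥ i
theorem pvCharA_eq_pvF (dd : List (String × String)) :
    ∀ (i : Nat) (c : Char), (pvBodyOf dd c = none ∨ c ∈ pvSafe dd i) →
      ∀ fuel, i ≤ fuel → pvCharA dd fuel c = pvF dd i c := by
  intro i
  induction i with
  | zero =>
    intro c hc fuel _
    rcases hc with h | h
    · rw [pvCharA_nonkey dd fuel c h]; rfl
    · exact absurd h (by simp [pvSafe])
  | succ i ih =>
    intro c hc fuel hfuel
    rcases hc with h | h
    · rw [pvCharA_nonkey dd fuel c h, pvF_nonkey dd c h]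
    · obtain ⟨b, hb, hall⟩ := pvSafeStep_elim dd h
      obtain ⟨kv, hkv, hc1, hc2⟩ := pvBodyOf_some_mem dd hb
      obtain ⟨hg, hne, -⟩ := pvBody_mem_get? dd hkv
      have hk1 : kv.1 = c.toString := pvToStringOfList hc1
      obtain ⟨fuel', rfl⟩ : ∃ f', fuel = f' + 1 := ⟨fuel - 1, by omega⟩
      have h1 : pvCharA dd (fuel' + 1) c = pvExpandA (PySem.Dict.ofList dd) (fuel' + 1) kv.2.toList := by
        rw [pvCharA, ← hk1, hg]
        dsimp only
        rw [if_neg (fun e => hne e.symm)]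
      rw [h1, pvExpandA_flat, hc2]
      have h2 : pvF dd (i+1) c = b.flatMap (pvF dd i) := by rw [pvF, hb]
      rw [h2, List.flatMap_def, List.flatMap_def]
      congr 1
      apply List.map_congr_left
      intro e he
      exact ih e (hall e he) fuel' (by omega)

-- ''.join with an empty separator is flatten (List Char side)
theorem pvCharsJoinNil : ∀ xs : List (List Char), PySem.Chars.join [] xs = xs.flatten
  | [] => PySem.Chars.join_nil []
  | [a] => by simp [PySem.Chars.join_singleton]
  | a :: b :: r => by
    rw [PySem.Chars.join_cons_cons, pvCharsJoinNil (b :: r)]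
    simp

theorem pvJoinNil (xs : List (List Char)) :
    PySem.Str.join "" (xs.map String.ofList) = String.ofList xs.flatten := by
  apply String.toList_inj.mp
  rw [PySem.Str.toList_join]
  have h1 : ("" : String).toList = [] := rfl
  rw [h1]
  have h2 : (xs.map String.ofList).map String.toList = xs := by
    rw [List.map_map]
    exact List.map_id'' (by simp) xs
  rw [h2, String.toList_ofList]
  exact pvCharsJoinNil xs

theorem pvTableGetD_mem (dd : List (String × String)) (g : String × String → String)
    {kv : String × String} (h : kv ∈ pvBody dd) :
    PySem.Dict.getD (PySem.Dict.ofList ((pvBody dd).map (fun kv => (kv.1, g kv)))) kv.1 kv.1 = g kv := by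
  have hnd : (((pvBody dd).map (fun kv => (kv.1, g kv))).map Prod.fst).Nodup := by
    rw [List.map_map]
    exact pvBody_keys_nodup dd
  have hitems := pvOfList_items hnd
  have hmem : (kv.1, g kv) ∈ (PySem.Dict.ofList ((pvBody dd).map (fun kv => (kv.1, g kv)))).items := by
    rw [hitems]; exact List.mem_map_of_mem h
  exact PySem.Dict.getD_of_mem_items _ hmem (PySem.Dict.nodup_keys_ofList _) _

theorem pvTableGetD_not_mem (dd : List (String × String)) (g : String × String → String)
    {c : Char} (h : ∀ kv ∈ pvBody dd, kv.1 ≠ c.toString) :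
    PySem.Dict.getD (PySem.Dict.ofList ((pvBody dd).map (fun kv => (kv.1, g kv)))) c.toString c.toString = c.toString := by
  apply PySem.Dict.getD_of_not_contains
  rw [PySem.Dict.contains_eq_decide_mem_keys]
  simp only [decide_eq_false_iff_not]
  intro hmem
  have hk : (PySem.Dict.ofList ((pvBody dd).map (fun kv => (kv.1, g kv)))).keys
      = ((pvBody dd).map (fun kv => (kv.1, g kv))).map Prod.fst := by
    have he : (PySem.Dict.ofList ((pvBody dd).map (fun kv => (kv.1, g kv)))).keys
        = (PySem.Dict.ofList ((pvBody dd).map (fun kv => (kv.1, g kv)))).items.map Prod.fst := rfl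
    rw [he, pvOfList_items (by rw [List.map_map]; exact pvBody_keys_nodup dd)]
  rw [hk, List.map_map] at hmem
  obtain ⟨kv, hkv, he⟩ := List.mem_map.mp hmem
  exact h kv hkv he

-- main B-side lemma: the j-th table realises pvF j at every character
theorem pvIter_getD (dd : List (String × String)) :
    ∀ (j : Nat) (c : Char),
      PySem.Dict.getD (pvIter dd j) c.toString c.toString = String.ofList (pvF dd j c) := by
  intro j
  induction j with
  | zero =>
    intro c
    by_cases hx : ∃ kv ∈ pvBody dd, kv.1 = c.toString
    · obtain ⟨kv, hkv, hk⟩ := hx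
      rw [pvIter, ← hk]
      rw [pvTableGetD_mem dd (fun kv => kv.1) hkv]
      rw [hk]; rfl
    · rw [pvIter, pvTableGetD_not_mem dd _ (fun kv hkv he => hx ⟨kv, hkv, he⟩)]
      rfl
  | succ j ih =>
    intro c
    by_cases hx : ∃ kv ∈ pvBody dd, kv.1 = c.toString
    · obtain ⟨kv, hkv, hk⟩ := hx
      rw [pvIter, ← hk]
      rw [pvTableGetD_mem dd _ hkv]
      have hc1 : kv.1.toList = [c] := by rw [hk]; simp [Char.toString]
      have hb : pvBodyOf dd c = some kv.2.toList := pvBodyOf_of_mem dd hkv hc1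
      have hF : pvF dd (j+1) c = kv.2.toList.flatMap (pvF dd j) := by rw [pvF, hb]
      rw [hF]
      have hm : kv.2.toList.map (fun e => PySem.Dict.getD (pvIter dd j) e.toString e.toString)
          = (kv.2.toList.map (pvF dd j)).map String.ofList := by
        rw [List.map_map]; exact List.map_congr_left (fun e _ => ih e)
      rw [hm, pvJoinNil, List.flatMap_def]
    · rw [pvIter, pvTableGetD_not_mem dd _ (fun kv hkv he => hx ⟨kv, hkv, he⟩)]
      have hnone : pvBodyOf dd c = none := by
        cases hb : pvBodyOf dd c with
        | none => rfl
        | some b =>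
          obtain ⟨kv, hkv, hc1, -⟩ := pvBodyOf_some_mem dd hb
          exact absurd (pvToStringOfList hc1) (fun e => hx ⟨kv, hkv, e⟩)
      rw [pvF_nonkey dd c hnone]
      rfl

theorem pvFoldlInsert_size (l : List (String × String)) :
    ∀ d : PySem.Dict String String,
      (l.foldl (fun d p => d.insert p.1 p.2) d).size ≤ d.size + l.length := by
  induction l with
  | nil => intro d; simp
  | cons p t ih =>
    intro d
    have h1 := ih (d.insert p.1 p.2)
    have h2 : (d.insert p.1 p.2).size ≤ d.size + 1 := by
      rw [PySem.Dict.size_insert]; split_ifs <;> omega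
    simp only [List.foldl_cons, List.length_cons]
    omega

theorem pvBody_length_le (dd : List (String × String)) :
    (pvBody dd).length ≤ dd.length := by
  have h1 : (pvBody dd).length ≤ (PySem.Dict.ofList dd).items.length := List.length_filter_le _ _
  have h2 : (PySem.Dict.ofList dd).size ≤ dd.length := by
    simpa [PySem.Dict.ofList, PySem.Dict.size_empty] using pvFoldlInsert_size dd PySem.Dict.empty
  exact le_trans h1 h2

-- B's fold over range n is pvIter n
theorem pvIter_foldl (dd : List (String × String)) : ∀ n : Nat,
    (List.range n).foldl (fun e _ => PySem.Dict.ofList ((pvBody dd).map (fun kv =>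
      (kv.1, PySem.Str.join "" (kv.2.toList.map (fun c =>
        PySem.Dict.getD e c.toString c.toString)))))) (pvIter dd 0) = pvIter dd n := by
  intro n
  induction n with
  | zero => rfl
  | succ n ih => rw [List.range_succ, List.foldl_append, ih]; rfl

-- ===== VERDICT (by name: the statement is the Claim_ definition above) =====
theorem recursive_decomp__spec : Claim_equal_recursive_decomp_ := by
  intro decomp dd _ hpre
  unfold Spec_recursive_decomp_
  have hA : recursive_decomp_ decomp dd
      = String.ofList (decomp.toList.flatMap (pvCharA dd dd.length)) := by
    rw [recursive_decomp_, pvExpandA_flat]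
  have hAc : decomp.toList.flatMap (pvCharA dd dd.length)
      = decomp.toList.flatMap (pvF dd (pvBody dd).length) := by
    rw [List.flatMap_def, List.flatMap_def]
    congr 1
    refine List.map_congr_left (fun c hc => ?_)
    have h := List.all_eq_true.mp hpre c hc
    simp only [Bool.or_eq_true, decide_eq_true_eq, List.contains_iff_mem] at h
    exact pvCharA_eq_pvF dd _ c h dd.length (pvBody_length_le dd)
  have hB : recursive_decomp__alt decomp dd
      = PySem.Str.join "" (decomp.toList.map (fun c =>
          PySem.Dict.getD (pvIter dd (pvBody dd).length) c.toString c.toString)) := by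
    rw [recursive_decomp__alt]
    have hb : List.filter (fun kv => PySem.Str.len kv.1 == 1 && kv.1 != kv.2)
        (PySem.Dict.ofList dd).items = pvBody dd := rfl
    rw [hb]
    have h0 : PySem.Dict.ofList ((pvBody dd).map (fun kv => (kv.1, kv.1))) = pvIter dd 0 := rfl
    rw [h0, pvIter_foldl dd]
  rw [hA, hAc, hB]
  have hm : decomp.toList.map (fun c =>
      PySem.Dict.getD (pvIter dd (pvBody dd).length) c.toString c.toString)
      = (decomp.toList.map (pvF dd (pvBody dd).length)).map String.ofList := by
    rw [List.map_map]
    exact List.map_congr_left (fun c _ => pvIter_getD dd _ c)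
  rw [hm, pvJoinNil, List.flatMap_def]
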